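-- pv_equiv track=rewrite | github.com/Zhenxi-Lin/grounded-engineering-document-workflow-agent | app/workflows/ask.py | convert_leading_verb_to_imperative
-- ===== SOURCE A (Python) =====
-- def convert_leading_verb_to_imperative(text: str) -> str:
--     replacements = {
--         "sourced ": "Source ",
--         "created ": "Create ",
--         "built ": "Build ",
--         "cloned ": "Clone ",
--         "installed ": "Install ",
--         "configured ": "Configure ",
--         "launched ": "Launch ",
--         "downloaded ": "Download ",
--         "navigated ": "Navigate ",
--         "ran ": "Run ",
--         "changed ": "Change ",
--         "creating ": "Create ",
--         "building ": "Build ",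
--     }
--     lowered = text.lower()
--     for prefix, replacement in replacements.items():
--         if lowered.startswith(prefix):
--             return replacement + text[len(prefix):]
--     return text
-- ===== SOURCE B (Python) =====
-- def convert_leading_verb_to_imperative(text: str) -> str:
--     table = {
--         "sourced": "Source ",
--         "created": "Create ",
--         "built": "Build ",
--         "cloned": "Clone ",
--         "installed": "Install ",
--         "configured": "Configure ",
--         "launched": "Launch ",
--         "downloaded": "Download ",
--         "navigated": "Navigate ",
--         "ran": "Run ",
--         "changed": "Change ",
--         "creating": "Create ",
--         "building": "Build ",
--     }
--     word, sep, _ = text.lower().partition(" ")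
--     if sep:
--         replacement = table.get(word)
--         if replacement is not None:
--             return replacement + text[len(word) + 1:]
--     return text
-- ===== Notes on version B (the rewrite author's own statement) =====
-- stated objective: alternative
-- what changed: Instead of scanning 13 verb-plus-space prefixes with startswith on the lowered text, B extracts the first space-delimited token once via str.partition and does a single keyed lookup in a bare-word table.
import Mathlib
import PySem

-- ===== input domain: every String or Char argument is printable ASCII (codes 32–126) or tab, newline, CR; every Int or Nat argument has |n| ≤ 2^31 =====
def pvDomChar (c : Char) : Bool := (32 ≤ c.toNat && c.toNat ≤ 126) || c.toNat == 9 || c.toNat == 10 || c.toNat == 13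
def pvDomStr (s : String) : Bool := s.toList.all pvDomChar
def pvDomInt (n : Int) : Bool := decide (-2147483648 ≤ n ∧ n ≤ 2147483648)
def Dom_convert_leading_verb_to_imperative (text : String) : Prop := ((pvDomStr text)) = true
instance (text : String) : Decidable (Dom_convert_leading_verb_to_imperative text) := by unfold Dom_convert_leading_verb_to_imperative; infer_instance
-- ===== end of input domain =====

-- B replaces A's scan over 13 startswith-tested prefixes by extracting the first
-- space-delimited token once (str.partition) and doing a single keyed table lookup (objective: alternative).

-- ===== PORT A =====
-- literal transliteration: lower the text, then try each "verb + space" prefix in dict order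
def convert_leading_verb_to_imperative (text : String) : String :=
  let lowered := PySem.Str.lower text
  if PySem.Str.startswith lowered "sourced " then "Source " ++ PySem.Str.slice text (some 8) none
  else if PySem.Str.startswith lowered "created " then "Create " ++ PySem.Str.slice text (some 8) none
  else if PySem.Str.startswith lowered "built " then "Build " ++ PySem.Str.slice text (some 6) none
  else if PySem.Str.startswith lowered "cloned " then "Clone " ++ PySem.Str.slice text (some 7) none
  else if PySem.Str.startswith lowered "installed " then "Install " ++ PySem.Str.slice text (some 10) none
  else if PySem.Str.startswith lowered "configured " then "Configure " ++ PySem.Str.slice text (some 11) none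
  else if PySem.Str.startswith lowered "launched " then "Launch " ++ PySem.Str.slice text (some 9) none
  else if PySem.Str.startswith lowered "downloaded " then "Download " ++ PySem.Str.slice text (some 11) none
  else if PySem.Str.startswith lowered "navigated " then "Navigate " ++ PySem.Str.slice text (some 10) none
  else if PySem.Str.startswith lowered "ran " then "Run " ++ PySem.Str.slice text (some 4) none
  else if PySem.Str.startswith lowered "changed " then "Change " ++ PySem.Str.slice text (some 8) none
  else if PySem.Str.startswith lowered "creating " then "Create " ++ PySem.Str.slice text (some 9) none
  else if PySem.Str.startswith lowered "building " then "Build " ++ PySem.Str.slice text (some 9) none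
  else text

-- ===== PORT B =====
-- the bare-word → imperative lookup table of Source B (keys as code-point lists)
def pvImpTable : PySem.Dict (List Char) String :=
  PySem.Dict.mk
    [(['s', 'o', 'u', 'r', 'c', 'e', 'd'], "Source "),
     (['c', 'r', 'e', 'a', 't', 'e', 'd'], "Create "),
     (['b', 'u', 'i', 'l', 't'], "Build "),
     (['c', 'l', 'o', 'n', 'e', 'd'], "Clone "),
     (['i', 'n', 's', 't', 'a', 'l', 'l', 'e', 'd'], "Install "),
     (['c', 'o', 'n', 'f', 'i', 'g', 'u', 'r', 'e', 'd'], "Configure "),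
     (['l', 'a', 'u', 'n', 'c', 'h', 'e', 'd'], "Launch "),
     (['d', 'o', 'w', 'n', 'l', 'o', 'a', 'd', 'e', 'd'], "Download "),
     (['n', 'a', 'v', 'i', 'g', 'a', 't', 'e', 'd'], "Navigate "),
     (['r', 'a', 'n'], "Run "),
     (['c', 'h', 'a', 'n', 'g', 'e', 'd'], "Change "),
     (['c', 'r', 'e', 'a', 't', 'i', 'n', 'g'], "Create "),
     (['b', 'u', 'i', 'l', 'd', 'i', 'n', 'g'], "Build ")]

-- word, sep, _ = text.lower().partition(' '): word = chars before the first space,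
-- sep nonempty iff a space occurs (takeWhile/dropWhile on the code points; exact)
def convert_leading_verb_to_imperative_alt (text : String) : String :=
  let ls := (PySem.Str.lower text).toList
  let word := ls.takeWhile (fun c => c != ' ')
  let sep := ls.dropWhile (fun c => c != ' ')
  if sep.isEmpty then text
  else
    match pvImpTable.get? word with
    | some repl => repl ++ String.ofList (text.toList.drop (word.length + 1))
    | none => text

-- ===== PRECONDITION & SPEC =====
def Spec_convert_leading_verb_to_imperative (text : String) (out : String) : Prop := out = convert_leading_verb_to_imperative_alt text
instance (text : String) (out : String) : Decidable (Spec_convert_leading_verb_to_imperative text out) := by unfold Spec_convert_leading_verb_to_imperative; infer_instance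

-- ===== CLAIM (what is proved, stated in full; the proofs are below) =====
def Claim_equal_convert_leading_verb_to_imperative : Prop := ∀ (text : String), Dom_convert_leading_verb_to_imperative text → Spec_convert_leading_verb_to_imperative text (convert_leading_verb_to_imperative text)

-- ===== LEMMAS AND PROOFS =====
set_option maxRecDepth 10000

-- 'lowered startswith (w ++ " ")' is the same as 'the first space-delimited token of lowered is w'
theorem word_prefix_iff (w ls : List Char) (hw : ∀ c ∈ w, c ≠ ' ') :
    (w ++ [' ']) <+: ls ↔
      (ls.takeWhile (fun c => c != ' ') = w ∧ ls.dropWhile (fun c => c != ' ') ≠ []) := by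
  induction w generalizing ls with
  | nil =>
    cases ls with
    | nil => simp
    | cons c t =>
      by_cases hc : c = ' '
      · simp [hc, List.cons_prefix_cons]
      · simp [List.cons_prefix_cons, hc, Ne.symm hc]
  | cons a w' ih =>
    have ha : a ≠ ' ' := hw a (by simp)
    cases ls with
    | nil => simp
    | cons c t =>
      by_cases hc : c = a
      · subst hc
        simp [List.cons_prefix_cons, ha, ih t (fun x hx => hw x (by simp [hx]))]
      · by_cases hs : c = ' '
        · simp [List.cons_prefix_cons, hs]
          exact fun h => absurd h ha
        · simp [List.cons_prefix_cons, hc, hs, Ne.symm hc]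

-- text[k:] as a plain drop on the code points
theorem slice_from_nat (s : String) (k : Nat) :
    PySem.Str.slice s (some (k : Int)) none = String.ofList (s.toList.drop k) := by
  rw [← String.toList_inj]
  simp [PySem.Str.toList_slice, PySem.Chars.slice_eq_listSlice, PySem.List.slice_from_natCast]

-- B's value when a space occurs and the first token is found in the table
theorem alt_hit (text : String) (w : List Char) (repl : String)
    (hget : pvImpTable.get? w = some repl)
    (ht : (PySem.Chars.lower text.toList).takeWhile (fun c => c != ' ') = w)
    (hd : (PySem.Chars.lower text.toList).dropWhile (fun c => c != ' ') ≠ []) :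
    convert_leading_verb_to_imperative_alt text
      = repl ++ String.ofList (text.toList.drop (w.length + 1)) := by
  unfold convert_leading_verb_to_imperative_alt
  simp only [PySem.Str.toList_lower, ht]
  rw [if_neg (by simpa [List.isEmpty_iff] using hd), hget]

-- B's value when no space occurs
theorem alt_miss_sep (text : String)
    (hd : (PySem.Chars.lower text.toList).dropWhile (fun c => c != ' ') = []) :
    convert_leading_verb_to_imperative_alt text = text := by
  unfold convert_leading_verb_to_imperative_alt
  simp only [PySem.Str.toList_lower]
  rw [if_pos (List.isEmpty_iff.mpr hd)]

-- B's value when a space occurs but the first token is not a table key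
theorem alt_miss (text : String)
    (hd : (PySem.Chars.lower text.toList).dropWhile (fun c => c != ' ') ≠ [])
    (hget : pvImpTable.get? ((PySem.Chars.lower text.toList).takeWhile (fun c => c != ' ')) = none) :
    convert_leading_verb_to_imperative_alt text = text := by
  unfold convert_leading_verb_to_imperative_alt
  simp only [PySem.Str.toList_lower]
  rw [if_neg (by simpa [List.isEmpty_iff] using hd), hget]

-- one positive branch of A equals B's table-hit value
theorem branch_eq (text : String) (w : List Char) (repl : String) (k : Nat)
    (hw : ∀ c ∈ w, c ≠ ' ') (hk : w.length + 1 = k)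
    (hget : pvImpTable.get? w = some repl)
    (hpre : (w ++ [' ']) <+: PySem.Chars.lower text.toList) :
    repl ++ PySem.Str.slice text (some (k : Int)) none
      = convert_leading_verb_to_imperative_alt text := by
  obtain ⟨ht, hd⟩ := (word_prefix_iff w _ hw).mp hpre
  rw [alt_hit text w repl hget ht hd, ← hk, slice_from_nat]

-- ===== VERDICT (by name: the statement is the Claim_ definition above) =====
theorem convert_leading_verb_to_imperative_spec : Claim_equal_convert_leading_verb_to_imperative := by
  intro text _
  unfold Spec_convert_leading_verb_to_imperative convert_leading_verb_to_imperative
  simp only [PySem.Str.startswith_eq, PySem.Str.toList_lower,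
    show "sourced ".toList = ['s', 'o', 'u', 'r', 'c', 'e', 'd', ' '] from rfl,
    show "created ".toList = ['c', 'r', 'e', 'a', 't', 'e', 'd', ' '] from rfl,
    show "built ".toList = ['b', 'u', 'i', 'l', 't', ' '] from rfl,
    show "cloned ".toList = ['c', 'l', 'o', 'n', 'e', 'd', ' '] from rfl,
    show "installed ".toList = ['i', 'n', 's', 't', 'a', 'l', 'l', 'e', 'd', ' '] from rfl,
    show "configured ".toList = ['c', 'o', 'n', 'f', 'i', 'g', 'u', 'r', 'e', 'd', ' '] from rfl,
    show "launched ".toList = ['l', 'a', 'u', 'n', 'c', 'h', 'e', 'd', ' '] from rfl,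
    show "downloaded ".toList = ['d', 'o', 'w', 'n', 'l', 'o', 'a', 'd', 'e', 'd', ' '] from rfl,
    show "navigated ".toList = ['n', 'a', 'v', 'i', 'g', 'a', 't', 'e', 'd', ' '] from rfl,
    show "ran ".toList = ['r', 'a', 'n', ' '] from rfl,
    show "changed ".toList = ['c', 'h', 'a', 'n', 'g', 'e', 'd', ' '] from rfl,
    show "creating ".toList = ['c', 'r', 'e', 'a', 't', 'i', 'n', 'g', ' '] from rfl,
    show "building ".toList = ['b', 'u', 'i', 'l', 'd', 'i', 'n', 'g', ' '] from rfl,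
    Bool.if_true_left]
  set ls := PySem.Chars.lower text.toList with hls
  have hsw : ∀ p : List Char,
      (PySem.Chars.startswith ls p = true) ↔ p <+: ls :=
    fun p => PySem.Chars.startswith_iff ls p
  by_cases h1 : ['s', 'o', 'u', 'r', 'c', 'e', 'd', ' '] <+: ls
  · rw [if_pos ((hsw _).mpr h1)]
    exact branch_eq text ['s', 'o', 'u', 'r', 'c', 'e', 'd'] "Source " 8 (by simp) rfl rfl h1
  rw [if_neg (fun hb => h1 ((hsw _).mp hb))]
  by_cases h2 : ['c', 'r', 'e', 'a', 't', 'e', 'd', ' '] <+: ls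
  · rw [if_pos ((hsw _).mpr h2)]
    exact branch_eq text ['c', 'r', 'e', 'a', 't', 'e', 'd'] "Create " 8 (by simp) rfl rfl h2
  rw [if_neg (fun hb => h2 ((hsw _).mp hb))]
  by_cases h3 : ['b', 'u', 'i', 'l', 't', ' '] <+: ls
  · rw [if_pos ((hsw _).mpr h3)]
    exact branch_eq text ['b', 'u', 'i', 'l', 't'] "Build " 6 (by simp) rfl rfl h3
  rw [if_neg (fun hb => h3 ((hsw _).mp hb))]
  by_cases h4 : ['c', 'l', 'o', 'n', 'e', 'd', ' '] <+: ls
  · rw [if_pos ((hsw _).mpr h4)]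
    exact branch_eq text ['c', 'l', 'o', 'n', 'e', 'd'] "Clone " 7 (by simp) rfl rfl h4
  rw [if_neg (fun hb => h4 ((hsw _).mp hb))]
  by_cases h5 : ['i', 'n', 's', 't', 'a', 'l', 'l', 'e', 'd', ' '] <+: ls
  · rw [if_pos ((hsw _).mpr h5)]
    exact branch_eq text ['i', 'n', 's', 't', 'a', 'l', 'l', 'e', 'd'] "Install " 10 (by simp) rfl rfl h5
  rw [if_neg (fun hb => h5 ((hsw _).mp hb))]
  by_cases h6 : ['c', 'o', 'n', 'f', 'i', 'g', 'u', 'r', 'e', 'd', ' '] <+: ls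
  · rw [if_pos ((hsw _).mpr h6)]
    exact branch_eq text ['c', 'o', 'n', 'f', 'i', 'g', 'u', 'r', 'e', 'd'] "Configure " 11 (by simp) rfl rfl h6
  rw [if_neg (fun hb => h6 ((hsw _).mp hb))]
  by_cases h7 : ['l', 'a', 'u', 'n', 'c', 'h', 'e', 'd', ' '] <+: ls
  · rw [if_pos ((hsw _).mpr h7)]
    exact branch_eq text ['l', 'a', 'u', 'n', 'c', 'h', 'e', 'd'] "Launch " 9 (by simp) rfl rfl h7
  rw [if_neg (fun hb => h7 ((hsw _).mp hb))]
  by_cases h8 : ['d', 'o', 'w', 'n', 'l', 'o', 'a', 'd', 'e', 'd', ' '] <+: ls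
  · rw [if_pos ((hsw _).mpr h8)]
    exact branch_eq text ['d', 'o', 'w', 'n', 'l', 'o', 'a', 'd', 'e', 'd'] "Download " 11 (by simp) rfl rfl h8
  rw [if_neg (fun hb => h8 ((hsw _).mp hb))]
  by_cases h9 : ['n', 'a', 'v', 'i', 'g', 'a', 't', 'e', 'd', ' '] <+: ls
  · rw [if_pos ((hsw _).mpr h9)]
    exact branch_eq text ['n', 'a', 'v', 'i', 'g', 'a', 't', 'e', 'd'] "Navigate " 10 (by simp) rfl rfl h9
  rw [if_neg (fun hb => h9 ((hsw _).mp hb))]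
  by_cases h10 : ['r', 'a', 'n', ' '] <+: ls
  · rw [if_pos ((hsw _).mpr h10)]
    exact branch_eq text ['r', 'a', 'n'] "Run " 4 (by simp) rfl rfl h10
  rw [if_neg (fun hb => h10 ((hsw _).mp hb))]
  by_cases h11 : ['c', 'h', 'a', 'n', 'g', 'e', 'd', ' '] <+: ls
  · rw [if_pos ((hsw _).mpr h11)]
    exact branch_eq text ['c', 'h', 'a', 'n', 'g', 'e', 'd'] "Change " 8 (by simp) rfl rfl h11
  rw [if_neg (fun hb => h11 ((hsw _).mp hb))]
  by_cases h12 : ['c', 'r', 'e', 'a', 't', 'i', 'n', 'g', ' '] <+: ls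
  · rw [if_pos ((hsw _).mpr h12)]
    exact branch_eq text ['c', 'r', 'e', 'a', 't', 'i', 'n', 'g'] "Create " 9 (by simp) rfl rfl h12
  rw [if_neg (fun hb => h12 ((hsw _).mp hb))]
  by_cases h13 : ['b', 'u', 'i', 'l', 'd', 'i', 'n', 'g', ' '] <+: ls
  · rw [if_pos ((hsw _).mpr h13)]
    exact branch_eq text ['b', 'u', 'i', 'l', 'd', 'i', 'n', 'g'] "Build " 9 (by simp) rfl rfl h13
  rw [if_neg (fun hb => h13 ((hsw _).mp hb))]
  by_cases hd : ls.dropWhile (fun c => c != ' ') = []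
  · exact (alt_miss_sep text hd).symm
  ·
    have hn1 : ['s', 'o', 'u', 'r', 'c', 'e', 'd'] ≠ ls.takeWhile (fun c => c != ' ') :=
      fun ht => h1 ((word_prefix_iff ['s', 'o', 'u', 'r', 'c', 'e', 'd'] ls (by simp)).mpr ⟨ht.symm, hd⟩)
    have hn2 : ['c', 'r', 'e', 'a', 't', 'e', 'd'] ≠ ls.takeWhile (fun c => c != ' ') :=
      fun ht => h2 ((word_prefix_iff ['c', 'r', 'e', 'a', 't', 'e', 'd'] ls (by simp)).mpr ⟨ht.symm, hd⟩)
    have hn3 : ['b', 'u', 'i', 'l', 't'] ≠ ls.takeWhile (fun c => c != ' ') :=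
      fun ht => h3 ((word_prefix_iff ['b', 'u', 'i', 'l', 't'] ls (by simp)).mpr ⟨ht.symm, hd⟩)
    have hn4 : ['c', 'l', 'o', 'n', 'e', 'd'] ≠ ls.takeWhile (fun c => c != ' ') :=
      fun ht => h4 ((word_prefix_iff ['c', 'l', 'o', 'n', 'e', 'd'] ls (by simp)).mpr ⟨ht.symm, hd⟩)
    have hn5 : ['i', 'n', 's', 't', 'a', 'l', 'l', 'e', 'd'] ≠ ls.takeWhile (fun c => c != ' ') :=
      fun ht => h5 ((word_prefix_iff ['i', 'n', 's', 't', 'a', 'l', 'l', 'e', 'd'] ls (by simp)).mpr ⟨ht.symm, hd⟩)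
    have hn6 : ['c', 'o', 'n', 'f', 'i', 'g', 'u', 'r', 'e', 'd'] ≠ ls.takeWhile (fun c => c != ' ') :=
      fun ht => h6 ((word_prefix_iff ['c', 'o', 'n', 'f', 'i', 'g', 'u', 'r', 'e', 'd'] ls (by simp)).mpr ⟨ht.symm, hd⟩)
    have hn7 : ['l', 'a', 'u', 'n', 'c', 'h', 'e', 'd'] ≠ ls.takeWhile (fun c => c != ' ') :=
      fun ht => h7 ((word_prefix_iff ['l', 'a', 'u', 'n', 'c', 'h', 'e', 'd'] ls (by simp)).mpr ⟨ht.symm, hd⟩)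
    have hn8 : ['d', 'o', 'w', 'n', 'l', 'o', 'a', 'd', 'e', 'd'] ≠ ls.takeWhile (fun c => c != ' ') :=
      fun ht => h8 ((word_prefix_iff ['d', 'o', 'w', 'n', 'l', 'o', 'a', 'd', 'e', 'd'] ls (by simp)).mpr ⟨ht.symm, hd⟩)
    have hn9 : ['n', 'a', 'v', 'i', 'g', 'a', 't', 'e', 'd'] ≠ ls.takeWhile (fun c => c != ' ') :=
      fun ht => h9 ((word_prefix_iff ['n', 'a', 'v', 'i', 'g', 'a', 't', 'e', 'd'] ls (by simp)).mpr ⟨ht.symm, hd⟩)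
    have hn10 : ['r', 'a', 'n'] ≠ ls.takeWhile (fun c => c != ' ') :=
      fun ht => h10 ((word_prefix_iff ['r', 'a', 'n'] ls (by simp)).mpr ⟨ht.symm, hd⟩)
    have hn11 : ['c', 'h', 'a', 'n', 'g', 'e', 'd'] ≠ ls.takeWhile (fun c => c != ' ') :=
      fun ht => h11 ((word_prefix_iff ['c', 'h', 'a', 'n', 'g', 'e', 'd'] ls (by simp)).mpr ⟨ht.symm, hd⟩)
    have hn12 : ['c', 'r', 'e', 'a', 't', 'i', 'n', 'g'] ≠ ls.takeWhile (fun c => c != ' ') :=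
      fun ht => h12 ((word_prefix_iff ['c', 'r', 'e', 'a', 't', 'i', 'n', 'g'] ls (by simp)).mpr ⟨ht.symm, hd⟩)
    have hn13 : ['b', 'u', 'i', 'l', 'd', 'i', 'n', 'g'] ≠ ls.takeWhile (fun c => c != ' ') :=
      fun ht => h13 ((word_prefix_iff ['b', 'u', 'i', 'l', 'd', 'i', 'n', 'g'] ls (by simp)).mpr ⟨ht.symm, hd⟩)
    have hget : pvImpTable.get? (ls.takeWhile (fun c => c != ' ')) = none := by
      simp [pvImpTable, PySem.Dict.get?_mk_cons, hn1, hn2, hn3, hn4, hn5, hn6, hn7, hn8, hn9, hn10, hn11, hn12, hn13, PySem.Dict.get?]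
    exact (alt_miss text hd hget).symm
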